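-- pv_equiv track=rewrite | github.com/MatiSanpedro/PROG_1-SP | PARCIAL 2/PARCIAL_2_funciones.py | validar_matriz_sector_4
-- ===== SOURCE A (Python) =====
-- def validar_matriz_sector_4(matriz_general_fin:list)->bool:
--     'recibe matriz general. recorre un segmento 3x3 de la matriz(ejemplo sector1 = 0-3,0-3) y verifica si hay numeros repetidos. Retorna bool, False si hay repetidos, True si no los hay'
--     bandera = None   #bandera de retorno
--     repetidos = set() #set de repetidos
--     vistos = set() #set de numeros vistos
--     hay_ceros = False #bandera que comprueba si existen ceros
--
--     for i in range(3,6):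
--
--         for j in range(0,3):
--             numero_inspeccionado = matriz_general_fin[i][j]
--
--             if numero_inspeccionado == 0: #verifica ceros en la matriz
--                 hay_ceros = True
--
--             if numero_inspeccionado in vistos: #  si esta en vistos, esta repetido
--                 repetidos.add(numero_inspeccionado)
--
--             if matriz_general_fin[i][j] != 0: #solo me interesan los numeros que no sean cero
--                 vistos.add(numero_inspeccionado)
--
--     if len(repetidos) == 0 and not hay_ceros: # si el largo de repetidos es 0 y a la vez no hay ceros en la matriz(osea espacios en blanco)
--         bandera = True
--     else:
--         bandera = False
--
--     return bandera
-- ===== SOURCE B (Python) =====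
-- def validar_matriz_sector_4(matriz_general_fin: list) -> bool:
--     'recibe matriz general. recorre el segmento 3x3 (filas 3-5, columnas 0-2) y retorna True si no hay ceros ni repetidos'
--     vals = [matriz_general_fin[i][j] for i in range(3, 6) for j in range(3)]
--
--     def ok(rest):
--         # recursion on the list: the head must be nonzero and absent from the tail
--         if not rest:
--             return True
--         head = rest[0]
--         tail = rest[1:]
--         return head != 0 and head not in tail and ok(tail)
--
--     return ok(vals)
-- ===== Notes on version B (the rewrite author's own statement) =====
-- stated objective: alternative
-- what changed: Replaces A's single pass that maintains vistos/repetidos/hay_ceros set state by a recursive head-versus-tail check with no auxiliary sets: each cell value must be nonzero and not occur in the remaining values, with early short-circuit.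
import Mathlib
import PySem

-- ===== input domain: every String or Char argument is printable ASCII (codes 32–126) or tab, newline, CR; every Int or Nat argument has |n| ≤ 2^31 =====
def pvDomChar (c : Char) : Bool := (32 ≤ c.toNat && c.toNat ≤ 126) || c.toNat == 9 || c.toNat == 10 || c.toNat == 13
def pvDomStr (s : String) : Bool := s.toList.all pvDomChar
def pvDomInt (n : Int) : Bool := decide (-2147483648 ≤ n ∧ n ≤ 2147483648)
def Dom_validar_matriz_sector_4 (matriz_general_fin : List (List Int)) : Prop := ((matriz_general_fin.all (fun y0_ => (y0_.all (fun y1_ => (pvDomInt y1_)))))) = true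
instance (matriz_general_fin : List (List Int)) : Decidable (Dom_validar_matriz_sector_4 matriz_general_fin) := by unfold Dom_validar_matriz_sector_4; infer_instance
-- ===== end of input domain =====

-- B replaces A's stateful pass (vistos/repetidos/hay_ceros sets) with a recursive
-- head-versus-tail check over the nine gathered cells, no auxiliary sets (objective: alternative).

-- ===== PORT A =====
def validar_matriz_sector_4 (matriz_general_fin : List (List Int)) : Bool :=
  -- bandera/repetidos/vistos/hay_ceros loop, transliterated; matriz[i][j] via pyGetD (in range under Pre_)
  let st :=
    (PySem.List.pyRange 3 6 1).foldl (fun st i =>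
      (PySem.List.pyRange 0 3 1).foldl (fun (st : PySem.Set Int × PySem.Set Int × Bool) j =>
        let numero := PySem.List.pyGetD (PySem.List.pyGetD matriz_general_fin i []) j 0
        let hay_ceros := if numero = 0 then true else st.2.2
        let repetidos := if PySem.Set.contains st.2.1 numero then PySem.Set.add st.1 numero else st.1
        let vistos := if numero ≠ 0 then PySem.Set.add st.2.1 numero else st.2.1
        (repetidos, vistos, hay_ceros)) st)
      ((PySem.Set.empty : PySem.Set Int), (PySem.Set.empty : PySem.Set Int), false)
  if PySem.Set.len st.1 = 0 && !st.2.2 then true else false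

-- ===== PORT B =====
-- B's inner 'ok(rest)': head nonzero, head not in tail, recurse on the tail
def pvOkRec : List Int → Bool
  | [] => true
  | head :: tail => (head != 0) && !(tail.contains head) && pvOkRec tail

def validar_matriz_sector_4_alt (matriz_general_fin : List (List Int)) : Bool :=
  let vals := (PySem.List.pyRange 3 6 1).flatMap (fun i =>
    (PySem.List.pyRange 0 3 1).map (fun j =>
      PySem.List.pyGetD (PySem.List.pyGetD matriz_general_fin i []) j 0))
  pvOkRec vals

-- ===== PRECONDITION & SPEC =====
-- Pre_ excludes matrices missing a full 3x3 sector at rows 3-5, cols 0-2, on which BOTH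
-- A and B raise IndexError in Python.
def Pre_validar_matriz_sector_4 (matriz_general_fin : List (List Int)) : Prop :=
  6 ≤ matriz_general_fin.length ∧
  3 ≤ (matriz_general_fin.getD 3 []).length ∧
  3 ≤ (matriz_general_fin.getD 4 []).length ∧
  3 ≤ (matriz_general_fin.getD 5 []).length
instance (matriz_general_fin : List (List Int)) : Decidable (Pre_validar_matriz_sector_4 matriz_general_fin) := by unfold Pre_validar_matriz_sector_4; infer_instance
def pvWitness_validar_matriz_sector_4 : List (List Int) :=
  [[], [], [], [1, 2, 3], [4, 5, 6], [7, 8, 9]]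
def Spec_validar_matriz_sector_4 (matriz_general_fin : List (List Int)) (out : Bool) : Prop := out = validar_matriz_sector_4_alt matriz_general_fin
instance (matriz_general_fin : List (List Int)) (out : Bool) : Decidable (Spec_validar_matriz_sector_4 matriz_general_fin out) := by unfold Spec_validar_matriz_sector_4; infer_instance

-- ===== CLAIM (what is proved, stated in full; the proofs are below) =====
def Claim_equal_validar_matriz_sector_4 : Prop := ∀ (matriz_general_fin : List (List Int)), Dom_validar_matriz_sector_4 matriz_general_fin → Pre_validar_matriz_sector_4 matriz_general_fin → Spec_validar_matriz_sector_4 matriz_general_fin (validar_matriz_sector_4 matriz_general_fin)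

-- ===== LEMMAS AND PROOFS =====

-- A's loop body as a step function on (repetidos, vistos, hay_ceros).
def pvStep (st : PySem.Set Int × PySem.Set Int × Bool) (v : Int) : PySem.Set Int × PySem.Set Int × Bool :=
  (if PySem.Set.contains st.2.1 v then PySem.Set.add st.1 v else st.1,
   if v ≠ 0 then PySem.Set.add st.2.1 v else st.2.1,
   if v = 0 then true else st.2.2)

-- "every value is nonzero and fresh w.r.t. the accumulated vistos set"
def pvOk (vis : PySem.Set Int) : List Int → Bool
  | [] => true
  | v :: r => (v != 0) && !(PySem.Set.contains vis v) && pvOk (PySem.Set.add vis v) r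

lemma pvAdd_len_ne (s : PySem.Set Int) (x : Int) : (PySem.Set.add s x).length ≠ 0 := by
  rw [PySem.Set.add_eq_ite]
  split
  · intro h
    rename_i hmem
    rw [List.length_eq_zero_iff] at h
    subst h
    simp at hmem
  · simp

lemma pvFold_sound : ∀ (vals : List Int) (rep vis : PySem.Set Int) (z : Bool),
    (((vals.foldl pvStep (rep, vis, z)).1.length == 0) && !(vals.foldl pvStep (rep, vis, z)).2.2)
      = ((rep.length == 0) && !z && pvOk vis vals) := by
  intro vals
  induction vals with
  | nil => intro rep vis z; simp [pvOk]
  | cons v r ih =>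
    intro rep vis z
    simp only [List.foldl_cons, pvOk]
    by_cases hz : v = 0
    · subst hz
      by_cases hv : PySem.Set.contains vis (0 : Int) = true
      · simp only [pvStep, hv, if_pos]
        simp [ih]
      · simp only [pvStep]
        simp only [hv]
        simp [ih]
    · by_cases hv : PySem.Set.contains vis v = true
      · simp only [pvStep, hv, if_pos]
        simp [hz, ih]
        intro h _
        exact absurd (congrArg List.length h) (pvAdd_len_ne rep v)
      · simp only [pvStep]
        simp only [hv]
        have hb : (v != 0) = true := bne_iff_ne.mpr hz
        simp [hz, ih, hb]

-- x ∈ add vis v as a boolean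
lemma pvContains_add (vis : PySem.Set Int) (v x : Int) :
    PySem.Set.contains (PySem.Set.add vis v) x = (PySem.Set.contains vis x || x == v) := by
  by_cases hm : v ∈ vis
  · rw [PySem.Set.add_of_mem hm]
    by_cases hx : x = v
    · have hb : (x == v) = true := beq_iff_eq.mpr hx
      simp only [hb, Bool.or_true]
      exact (PySem.Set.contains_iff vis x).mpr (by rw [hx]; exact hm)
    · simp [beq_eq_false_iff_ne.mpr hx]
  · rw [PySem.Set.add_of_not_mem hm]
    by_cases hx : x = v <;> simp [hx, PySem.Set.contains]

lemma pvAll_not_or (v : Int) : ∀ (r : List Int) (vis : PySem.Set Int),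
    r.all (fun x => !(PySem.Set.contains vis x || x == v))
      = (r.all (fun x => !(PySem.Set.contains vis x)) && !(r.contains v)) := by
  intro r
  induction r with
  | nil => intro vis; simp
  | cons y t iht =>
    intro vis
    simp only [List.all_cons, List.contains_cons]
    rw [iht]
    by_cases hy : y = v
    · have hb : (y == v) = true := beq_iff_eq.mpr hy
      have hb2 : (v == y) = true := beq_iff_eq.mpr hy.symm
      cases hA : PySem.Set.contains vis y <;> cases hB : t.contains v <;>
        cases hC : t.all (fun x => !(PySem.Set.contains vis x)) <;> simp [hb, hb2]
    · have hb : (y == v) = false := beq_eq_false_iff_ne.mpr hy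
      have hb2 : (v == y) = false := beq_eq_false_iff_ne.mpr (Ne.symm hy)
      cases hA : PySem.Set.contains vis y <;> cases hB : t.contains v <;>
        cases hC : t.all (fun x => !(PySem.Set.contains vis x)) <;> simp [hb, hb2]

-- pvOk with accumulator vis = B's recursion, provided nothing of the list is already in vis
lemma pvOk_eq_rec : ∀ (vals : List Int) (vis : PySem.Set Int),
    pvOk vis vals = (pvOkRec vals && vals.all (fun x => !(PySem.Set.contains vis x))) := by
  intro vals
  induction vals with
  | nil => intro vis; simp [pvOk, pvOkRec]
  | cons v r ih =>
    intro vis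
    simp only [pvOk, pvOkRec, ih, List.all_cons]
    have hall : r.all (fun x => !(PySem.Set.contains (PySem.Set.add vis v) x))
        = (r.all (fun x => !(PySem.Set.contains vis x)) && !(r.contains v)) := by
      simp only [pvContains_add]
      exact pvAll_not_or v r vis
    rw [hall]
    cases h1 : v != 0 <;> cases h2 : PySem.Set.contains vis v <;>
      cases h3 : r.contains v <;> cases h4 : pvOkRec r <;>
      cases h5 : r.all (fun x => !(PySem.Set.contains vis x)) <;> simp

lemma pvBridge (vals : List Int) :
    (if PySem.Set.len (vals.foldl pvStep ((PySem.Set.empty : PySem.Set Int), (PySem.Set.empty : PySem.Set Int), false)).1 = 0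
        && !(vals.foldl pvStep ((PySem.Set.empty : PySem.Set Int), (PySem.Set.empty : PySem.Set Int), false)).2.2
     then true else false)
      = pvOkRec vals := by
  have h2 : pvOk (PySem.Set.empty : PySem.Set Int) vals = pvOkRec vals := by
    rw [pvOk_eq_rec]
    simp [PySem.Set.contains, PySem.Set.empty]
  have h1 := pvFold_sound vals PySem.Set.empty PySem.Set.empty false
  rw [h2] at h1
  simp only [show (PySem.Set.empty : PySem.Set Int) = ([] : List Int) from rfl] at h1 ⊢
  simp only [List.length_nil, beq_self_eq_true, Bool.not_false, Bool.true_and] at h1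
  set st := vals.foldl pvStep (([] : List Int), ([] : List Int), false) with hst
  have hcast : (decide ((PySem.Set.len st.1) = 0)) = (st.1.length == 0) := by
    by_cases hL : st.1.length = 0 <;> simp [PySem.Set.len, hL]
  rw [hcast, h1]
  cases pvOkRec vals <;> simp

theorem pvMain (matriz_general_fin : List (List Int)) :
    validar_matriz_sector_4 matriz_general_fin = validar_matriz_sector_4_alt matriz_general_fin := by
  unfold validar_matriz_sector_4 validar_matriz_sector_4_alt
  have hAfold :
      (PySem.List.pyRange 3 6 1).foldl (fun st i =>
        (PySem.List.pyRange 0 3 1).foldl (fun (st : PySem.Set Int × PySem.Set Int × Bool) j =>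
          let numero := PySem.List.pyGetD (PySem.List.pyGetD matriz_general_fin i []) j 0
          let hay_ceros := if numero = 0 then true else st.2.2
          let repetidos := if PySem.Set.contains st.2.1 numero then PySem.Set.add st.1 numero else st.1
          let vistos := if numero ≠ 0 then PySem.Set.add st.2.1 numero else st.2.1
          (repetidos, vistos, hay_ceros)) st)
        ((PySem.Set.empty : PySem.Set Int), (PySem.Set.empty : PySem.Set Int), false)
      = ((PySem.List.pyRange 3 6 1).flatMap (fun i =>
          (PySem.List.pyRange 0 3 1).map (fun j =>
            PySem.List.pyGetD (PySem.List.pyGetD matriz_general_fin i []) j 0))).foldl pvStep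
          ((PySem.Set.empty : PySem.Set Int), (PySem.Set.empty : PySem.Set Int), false) := by
    rw [List.foldl_flatMap]
    simp only [List.foldl_map]
    rfl
  simp only [hAfold]
  exact pvBridge _

-- ===== VERDICT (by name: the statement is the Claim_ definition above) =====
theorem validar_matriz_sector_4_spec : Claim_equal_validar_matriz_sector_4 := by
  intro m _ _
  unfold Spec_validar_matriz_sector_4
  exact pvMain m
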